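-- pv_equiv track=rewrite | github.com/khanhdk0000/coding-interview | coderbyte/waveSorting.py | WaveSorting
-- ===== SOURCE A (Python) =====
-- def WaveSorting(arr):
--     freq = {}
--     for num in arr:
--         freq[num] = freq.get(num, 0) + 1
--     maxFreq = max(freq.values())
--     if maxFreq >= (len(arr) + 1) // 2:
--         return "false"
--     return "true"
-- ===== SOURCE B (Python) =====
-- def WaveSorting(arr):
--     maxFreq = 0
--     cur = 0
--     prev = None
--     for x in sorted(arr):
--         cur = cur + 1 if x == prev else 1
--         if cur > maxFreq:
--             maxFreq = cur
--         prev = x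
--     if maxFreq >= (len(arr) + 1) // 2:
--         return "false"
--     return "true"
-- ===== Notes on version B (the rewrite author's own statement) =====
-- stated objective: alternative
-- what changed: Replaces the hash-map frequency dictionary plus max over its values with sort-then-scan: a single pass over the sorted copy tracks the current run length and the maximum run length, which equals the maximum frequency.
-- crash fix: On the empty list A raises ValueError (max() of an empty sequence) while B's running maximum is 0, below the threshold, so B returns "false". — e.g. on WaveSorting([]): A raises ValueError, B returns "false"
import Mathlib
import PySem

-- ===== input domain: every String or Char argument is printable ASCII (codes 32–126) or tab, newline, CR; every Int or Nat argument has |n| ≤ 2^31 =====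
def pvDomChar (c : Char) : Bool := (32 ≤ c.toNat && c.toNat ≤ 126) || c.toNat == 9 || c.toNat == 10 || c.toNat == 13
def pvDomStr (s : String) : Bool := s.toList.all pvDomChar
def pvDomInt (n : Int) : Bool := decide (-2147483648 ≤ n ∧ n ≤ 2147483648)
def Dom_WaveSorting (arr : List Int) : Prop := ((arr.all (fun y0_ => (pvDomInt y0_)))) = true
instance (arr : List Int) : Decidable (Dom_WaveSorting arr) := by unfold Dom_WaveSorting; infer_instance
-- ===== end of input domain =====

-- B replaces A's hash-map frequency count with a sort-then-scan over runs of equal elements (alternative algorithm, same result).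


-- ===== PORT A =====
def WaveSorting (arr : List Int) : String :=
  let freq := arr.foldl (fun d num => d.insert num (d.getD num 0 + 1)) (PySem.Dict.empty : PySem.Dict Int Int)
  match PySem.List.max? (PySem.Dict.values freq) (fun v => v) with
  | none => ""   -- unreachable under Pre_: Python raises ValueError on max([]) here
  | some maxFreq =>
    if maxFreq ≥ PySem.Int.floordiv ((arr.length : Int) + 1) 2 then "false" else "true"

-- ===== PORT B =====
-- one step of B's loop: state = (maxFreq, cur, prev)
def waveStep (st : Int × Int × Option Int) (x : Int) : Int × Int × Option Int :=
  let cur := if some x = st.2.2 then st.2.1 + 1 else 1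
  let mf := if cur > st.1 then cur else st.1
  (mf, cur, some x)

def WaveSorting_alt (arr : List Int) : String :=
  let st := (PySem.List.sorted arr (fun x => x) false).foldl waveStep (0, 0, none)
  if st.1 ≥ PySem.Int.floordiv ((arr.length : Int) + 1) 2 then "false" else "true"

-- ===== PRECONDITION & SPEC =====
-- Pre_ excludes exactly the empty list, on which A raises ValueError (max() of an empty sequence).
def Pre_WaveSorting (arr : List Int) : Prop := arr ≠ []
instance (arr : List Int) : Decidable (Pre_WaveSorting arr) := by unfold Pre_WaveSorting; infer_instance
def pvWitness_WaveSorting : List Int := [1, 2, 1]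

-- On the empty list A raises ValueError while B's running maximum is 0, below the threshold, so B returns "false".
def Raises_WaveSorting (arr : List Int) : Prop := arr = []
instance (arr : List Int) : Decidable (Raises_WaveSorting arr) := by unfold Raises_WaveSorting; infer_instance
def pvRaiseWitness_WaveSorting : List Int := []
def pvRaiseWitnessOut_WaveSorting : String := "false"

def Spec_WaveSorting (arr : List Int) (out : String) : Prop := out = WaveSorting_alt arr
instance (arr : List Int) (out : String) : Decidable (Spec_WaveSorting arr out) := by unfold Spec_WaveSorting; infer_instance

-- ===== CLAIM (what is proved, stated in full; the proofs are below) =====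
def Claim_equal_WaveSorting : Prop := ∀ (arr : List Int), Dom_WaveSorting arr → Pre_WaveSorting arr → Spec_WaveSorting arr (WaveSorting arr)
def Claim_raises_WaveSorting : Prop := (∀ (arr : List Int), Dom_WaveSorting arr → Raises_WaveSorting arr → ¬ Pre_WaveSorting arr) ∧ (Dom_WaveSorting (pvRaiseWitness_WaveSorting) ∧ Raises_WaveSorting (pvRaiseWitness_WaveSorting) ∧ WaveSorting_alt (pvRaiseWitness_WaveSorting) = pvRaiseWitnessOut_WaveSorting)

-- ===== LEMMAS AND PROOFS =====

-- counting through an appended singleton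
lemma count_append_single (l : List Int) (y x : Int) :
    (l ++ [x]).count y = l.count y + if y = x then 1 else 0 := by
  rcases eq_or_ne y x with h | h
  · subst h; simp [List.count_append]
  · have : y ∉ [x] := by simp [h]
    simp [List.count_append, List.count_eq_zero.2 this, h]

-- how one step of B's loop acts on a state
lemma waveStep_apply (mf cur x : Int) (pr : Option Int) :
    waveStep (mf, cur, pr) x
      = (max mf (if some x = pr then cur + 1 else 1), (if some x = pr then cur + 1 else 1), some x) := by
  simp only [waveStep]
  split_ifs with h1 h2 h3 <;> simp [Prod.ext_iff] <;> omega

-- Invariant of B's fold over a sorted nonempty prefix p: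
-- maxFreq is the maximum multiplicity in p, cur is the multiplicity of the last element, prev is the last element.
lemma waveFold_inv (p : List Int) (hp : p.Pairwise (· ≤ ·)) (hne : p ≠ []) :
    ∃ mf last, p.foldl waveStep (0, 0, none) = (mf, (p.count last : Int), some last) ∧
      last ∈ p ∧ (∀ y ∈ p, y ≤ last) ∧
      (∃ y ∈ p, (p.count y : Int) = mf) ∧ (∀ y ∈ p, (p.count y : Int) ≤ mf) := by
  induction p using List.reverseRecOn with
  | nil => exact absurd rfl hne
  | append_singleton p x ih =>
    rcases List.eq_nil_or_concat' p with hp0 | ⟨q, a, rfl⟩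
    · subst hp0
      refine ⟨1, x, ?_, by simp, by simp, ⟨x, by simp⟩, by simp⟩
      simp [waveStep]
    · have hpl : (q ++ [a]).Pairwise (· ≤ ·) := (List.pairwise_append.1 hp).1
      have hle : ∀ y ∈ q ++ [a], y ≤ x := by
        intro y hy
        exact (List.pairwise_append.1 hp).2.2 y hy x (by simp)
      obtain ⟨mf, last, hfold, hlmem, hlmax, ⟨w, hwmem, hwcnt⟩, hbound⟩ := ih hpl (by simp)
      rw [List.foldl_append, hfold]
      simp only [List.foldl_cons, List.foldl_nil]
      rw [waveStep_apply]
      set P := q ++ [a] with hP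
      have hlx : last ≤ x := hle last hlmem
      have hcount : ∀ y, ((P ++ [x]).count y : Int) = (P.count y : Int) + if y = x then 1 else 0 := by
        intro y; rw [count_append_single]; split <;> simp
      by_cases hxl : x = last
      · -- run continues
        subst hxl
        have hite : (if some x = some x then ((P.count x : Int)) + 1 else 1) = (P.count x : Int) + 1 := by simp
        rw [hite]
        refine ⟨max mf ((P.count x : Int) + 1), x, ?_, by simp, ?_, ?_, ?_⟩
        · have : ((P ++ [x]).count x : Int) = (P.count x : Int) + 1 := by rw [hcount]; simp
          rw [this]
        · intro y hy
          rcases List.mem_append.1 hy with h | h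
          · exact hle y h
          · simp at h; omega
        · by_cases hge : (P.count x : Int) + 1 ≤ mf
          · refine ⟨w, List.mem_append_left _ hwmem, ?_⟩
            have hwx : w ≠ x := by
              intro h; subst h
              have := hbound w hwmem
              omega
            rw [hcount]
            simp [hwx, hwcnt] <;> omega
          · refine ⟨x, by simp, ?_⟩
            rw [hcount]; simp <;> omega
        · intro y hy
          by_cases hyx : y = x
          · subst hyx; rw [hcount]; simp <;> omega
          · rcases List.mem_append.1 hy with h | h
            · have := hbound y h
              rw [hcount]; simp [hyx] <;> omega
            · simp at h; exact absurd h hyx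
      · -- new run of length 1
        have hxnot : x ∉ P := by
          intro hx
          exact hxl (le_antisymm (hlmax x hx) hlx)
        have hcnt0 : P.count x = 0 := List.count_eq_zero.2 hxnot
        have hite : (if some x = some last then ((P.count last : Int)) + 1 else 1) = 1 := by
          simp [hxl]
        rw [hite]
        refine ⟨max mf 1, x, ?_, by simp, ?_, ?_, ?_⟩
        · have : ((P ++ [x]).count x : Int) = 1 := by rw [hcount]; simp [hcnt0]
          rw [this]
        · intro y hy
          rcases List.mem_append.1 hy with h | h
          · exact hle y h
          · simp at h; omega
        · by_cases hge : (1 : Int) ≤ mf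
          · refine ⟨w, List.mem_append_left _ hwmem, ?_⟩
            have hwx : w ≠ x := fun h => hxnot (h ▸ hwmem)
            rw [hcount]
            simp [hwx, hwcnt] <;> omega
          · refine ⟨x, by simp, ?_⟩
            rw [hcount]; simp [hcnt0] <;> omega
        · intro y hy
          by_cases hyx : y = x
          · subst hyx; rw [hcount]; simp [hcnt0] <;> omega
          · rcases List.mem_append.1 hy with h | h
            · have := hbound y h
              rw [hcount]; simp [hyx] <;> omega
            · simp at h; exact absurd h hyx

-- A's maxFreq: max over the counter's values, characterised by membership and bound.
lemma maxA_spec (arr : List Int) (hne : arr ≠ []) :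
    ∃ m, PySem.List.max? (PySem.Dict.values (arr.foldl (fun d num => d.insert num (d.getD num 0 + 1)) (PySem.Dict.empty : PySem.Dict Int Int))) (fun v => v) = some m ∧
      (∃ k ∈ arr, (arr.count k : Int) = m) ∧ (∀ k ∈ arr, (arr.count k : Int) ≤ m) := by
  rw [PySem.Dict.foldl_insert_getD_add_one_eq_counter]
  have hvals : (PySem.Dict.counter arr).values
      = (PySem.Set.ofList arr).map (fun k => (arr.count k : Int)) := by
    have := PySem.Dict.values_eq_map_keys (PySem.Dict.counter arr) (PySem.Dict.nodup_keys_counter arr) (0 : Int)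
    rw [this, PySem.Dict.keys_counter]
    exact List.map_congr_left (fun k _ => by rw [PySem.Dict.getD_counter])
  have hvne : (PySem.Dict.counter arr).values ≠ [] := by
    rw [hvals]
    rcases List.exists_mem_of_ne_nil arr hne with ⟨x, hx⟩
    have : x ∈ PySem.Set.ofList arr := (PySem.Set.mem_ofList _ _).2 hx
    intro h
    simp [List.map_eq_nil_iff] at h
    rw [h] at this; exact absurd this (List.not_mem_nil)
  cases hm : PySem.List.max? (PySem.Dict.counter arr).values (fun v => v) with
  | none => exact absurd ((PySem.List.max?_eq_none_iff _ _).1 hm) hvne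
  | some m => ?_
  refine ⟨m, rfl, ?_, ?_⟩
  · have hmem := PySem.List.max?_mem hm
    rw [hvals] at hmem
    rcases List.mem_map.1 hmem with ⟨k, hk, hkm⟩
    exact ⟨k, (PySem.Set.mem_ofList _ _).1 hk, hkm⟩
  · intro k hk
    have := PySem.List.max?_isMax hm ((arr.count k : Int)) ?_
    · exact this
    · rw [hvals]
      exact List.mem_map.2 ⟨k, (PySem.Set.mem_ofList _ _).2 hk, rfl⟩

-- ===== VERDICT (by name: the statement is the Claim_ definition above) =====
theorem WaveSorting_spec : Claim_equal_WaveSorting := by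
  intro arr _ hpre
  unfold Spec_WaveSorting WaveSorting WaveSorting_alt
  obtain ⟨mA, hmA, ⟨kA, hkA, hkAeq⟩, hAbound⟩ := maxA_spec arr hpre
  have hperm : (PySem.List.sorted arr (fun x => x) false).Perm arr :=
    PySem.List.sorted_perm arr (fun x => x) false
  have hsp : (PySem.List.sorted arr (fun x => x) false).Pairwise (· ≤ ·) :=
    PySem.List.sorted_pairwise arr (fun x => x)
  have hsne : PySem.List.sorted arr (fun x => x) false ≠ [] := by
    intro h
    exact hpre ((PySem.List.sorted_eq_nil_iff arr (fun x => x) false).1 h)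
  obtain ⟨mB, last, hfold, hlmem, _, ⟨w, hwmem, hwcnt⟩, hBbound⟩ := waveFold_inv _ hsp hsne
  have hcount : ∀ y, (PySem.List.sorted arr (fun x => x) false).count y = arr.count y :=
    fun y => hperm.count_eq y
  have hAB : mA = mB := by
    have h1 : mA ≤ mB := by
      have hks : kA ∈ PySem.List.sorted arr (fun x => x) false := hperm.mem_iff.2 hkA
      have := hBbound kA hks
      rw [hcount] at this; omega
    have h2 : mB ≤ mA := by
      have hwarr : w ∈ arr := hperm.mem_iff.1 hwmem
      have := hAbound w hwarr
      rw [hcount] at hwcnt; omega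
    omega
  simp only [hmA, hfold, hAB]

@[simp] theorem WaveSorting_raises : Claim_raises_WaveSorting := by
  unfold Claim_raises_WaveSorting
  exact ⟨fun arr _ hr hp => hp hr, by decide⟩
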